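-- pv_equiv track=rewrite | github.com/sclukas/Galaxy_modification_calling | Galaxy_Repo_Version/setup/extra_files/old_scripts/overhangtrimming.py | getActiveElevators
-- ===== SOURCE A (Python) =====
-- def getActiveElevators(elevatorlist, elevatordict, ending_indices):
--     for i in range(0, len(ending_indices)):
--         try:
--             elevatorlist.remove(ending_indices[i])
--             del elevatordict[ending_indices[i]]  # inactivate elevator, if present
--         except:
--             pass
--
--     return elevatordict, elevatorlist
-- ===== SOURCE B (Python) =====
-- def getActiveElevators(elevatorlist, elevatordict, ending_indices):
--     # Count how many copies of each value must be removed, then rebuild the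
--     # list in one pass skipping that many first occurrences; delete each dict
--     # key that occurs both in ending_indices and in the original list.
--     need = {}
--     for e in ending_indices:
--         need[e] = need.get(e, 0) + 1
--     ends = set(ending_indices)
--     present = set(elevatorlist)
--     kept = []
--     for x in elevatorlist:
--         if need.get(x, 0) > 0:
--             need[x] -= 1
--         else:
--             kept.append(x)
--     elevatorlist[:] = kept
--     for k in [k for k in list(elevatordict) if k in ends and k in present]:
--         del elevatordict[k]
--     return elevatordict, elevatorlist
-- ===== Notes on version B (the rewrite author's own statement) =====
-- stated objective: faster
-- what changed: Instead of calling list.remove/del inside a loop over ending_indices (each remove a linear scan), B counts needed removals per value once, rebuilds the list in a single pass skipping that many first occurrences, and deletes dict keys by one membership-filtered pass.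
import Mathlib
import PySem

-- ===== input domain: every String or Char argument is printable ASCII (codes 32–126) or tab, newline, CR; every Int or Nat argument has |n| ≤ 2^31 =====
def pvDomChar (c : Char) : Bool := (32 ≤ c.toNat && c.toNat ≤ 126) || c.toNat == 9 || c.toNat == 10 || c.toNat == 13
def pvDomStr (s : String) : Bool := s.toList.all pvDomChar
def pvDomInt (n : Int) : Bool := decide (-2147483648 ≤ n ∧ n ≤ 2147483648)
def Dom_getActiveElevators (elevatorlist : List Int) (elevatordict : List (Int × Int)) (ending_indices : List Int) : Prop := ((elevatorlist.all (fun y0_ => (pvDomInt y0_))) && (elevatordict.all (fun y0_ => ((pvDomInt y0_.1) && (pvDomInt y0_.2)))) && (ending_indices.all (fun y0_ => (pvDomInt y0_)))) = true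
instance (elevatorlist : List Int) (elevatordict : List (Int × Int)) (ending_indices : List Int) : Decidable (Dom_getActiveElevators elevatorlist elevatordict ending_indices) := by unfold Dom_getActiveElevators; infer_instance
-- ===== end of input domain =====

-- B replaces A's per-index remove/del loop (each remove a linear scan) by a counted single-pass
-- rebuild of the list plus one membership-filtered deletion pass over the dict; both Pythons mutate
-- their list/dict arguments the same way, and the equivalence proved here is about the return value.

-- `del d[k]` on the association list representing a Python dict (no-op when absent; A's KeyError is caught)
def pvEraseKey (d : List (Int × Int)) (k : Int) : List (Int × Int) :=
  d.filter (fun p => p.1 ≠ k)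

-- ===== PORT A =====
-- one iteration of A's loop: try remove; on success also del the dict key (a failing del is caught after the remove persisted)
def pvStepA (st : List Int × List (Int × Int)) (e : Int) : List Int × List (Int × Int) :=
  match PySem.List.remove? st.1 e with
  | none => st
  | some l' => (l', pvEraseKey st.2 e)

def getActiveElevators (elevatorlist : List Int) (elevatordict : List (Int × Int)) (ending_indices : List Int) : (List (Int × Int)) × List Int :=
  let st := ending_indices.foldl pvStepA (elevatorlist, elevatordict)
  (st.2, st.1)

-- ===== PORT B =====
def getActiveElevators_alt (elevatorlist : List Int) (elevatordict : List (Int × Int)) (ending_indices : List Int) : (List (Int × Int)) × List Int :=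
  let need : PySem.Dict Int Int := ending_indices.foldl (fun d e => d.modify e 0 (· + 1)) PySem.Dict.empty
  let ends : PySem.Set Int := PySem.Set.ofList ending_indices
  let present : PySem.Set Int := PySem.Set.ofList elevatorlist
  let r := elevatorlist.foldl
    (fun (st : PySem.Dict Int Int × List Int) x =>
      if st.1.getD x 0 > 0 then (st.1.modify x 0 (· - 1), st.2) else (st.1, st.2 ++ [x]))
    (need, [])
  let kept := r.2
  let dels := (elevatordict.map (·.1)).filter (fun k => PySem.Set.contains ends k && PySem.Set.contains present k)
  let d2 := dels.foldl pvEraseKey elevatordict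
  (d2, kept)

-- ===== PRECONDITION & SPEC =====
def Spec_getActiveElevators (elevatorlist : List Int) (elevatordict : List (Int × Int)) (ending_indices : List Int) (out : (List (Int × Int)) × List Int) : Prop := out = getActiveElevators_alt elevatorlist elevatordict ending_indices
instance (elevatorlist : List Int) (elevatordict : List (Int × Int)) (ending_indices : List Int) (out : (List (Int × Int)) × List Int) : Decidable (Spec_getActiveElevators elevatorlist elevatordict ending_indices out) := by unfold Spec_getActiveElevators; infer_instance

-- ===== CLAIM (what is proved, stated in full; the proofs are below) =====
def Claim_equal_getActiveElevators : Prop := ∀ (elevatorlist : List Int) (elevatordict : List (Int × Int)) (ending_indices : List Int), Dom_getActiveElevators elevatorlist elevatordict ending_indices → Spec_getActiveElevators elevatorlist elevatordict ending_indices (getActiveElevators elevatorlist elevatordict ending_indices)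

-- ===== LEMMAS AND PROOFS =====

-- skip, for each value x, the first (c x) occurrences of x
def pvSkip : (Int → Nat) → List Int → List Int
  | _, [] => []
  | c, x :: xs => if c x > 0 then pvSkip (fun y => if y = x then c y - 1 else c y) xs else x :: pvSkip c xs

lemma pvSkip_zero (l : List Int) : pvSkip (fun _ => 0) l = l := by
  induction l with
  | nil => rfl
  | cons x xs ih => simp [pvSkip, ih]

-- bumping the budget of e by one = removing the first occurrence of e (no-op if absent), then skipping
lemma pvSkip_bump (l : List Int) (c : Int → Nat) (e : Int) :
    pvSkip (fun y => if y = e then c y + 1 else c y) l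
      = pvSkip c ((PySem.List.remove? l e).getD l) := by
  induction l generalizing c with
  | nil => simp [PySem.List.remove?, pvSkip]
  | cons x xs ih =>
    by_cases hxe : x = e
    · subst hxe
      rw [PySem.List.remove?_cons_self, Option.getD_some]
      have hc' : (fun y => if y = x then c y + 1 else c y) x > 0 := by simp
      rw [pvSkip, if_pos hc']
      have hfun : (fun y => if y = x then (if y = x then c y + 1 else c y) - 1
                    else (if y = x then c y + 1 else c y)) = c := by
        funext y
        by_cases hy : y = x <;> simp [hy]
      rw [hfun]
    · rw [PySem.List.remove?_cons_of_ne xs hxe]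
      have hrem : ((PySem.List.remove? xs e).map (x :: ·)).getD (x :: xs)
          = x :: (PySem.List.remove? xs e).getD xs := by
        cases PySem.List.remove? xs e <;> rfl
      rw [hrem, pvSkip]
      simp only [if_neg hxe]
      by_cases hc : c x > 0
      · rw [if_pos hc, pvSkip, if_pos hc]
        have hfun : (fun y => if y = x then (if y = e then c y + 1 else c y) - 1
                          else (if y = e then c y + 1 else c y))
             = (fun y => if y = e then (fun z => if z = x then c z - 1 else c z) y + 1
                          else (fun z => if z = x then c z - 1 else c z) y) := by
          funext y
          by_cases h1 : y = x <;> by_cases h2 : y = e <;> simp_all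
        rw [hfun, ih]
      · rw [if_neg hc, pvSkip, if_neg hc, ih]

-- the characterisation of A's fold: skipped list + key-filtered dict
lemma pvFoldA_eq (es l : List Int) (d : List (Int × Int)) :
    es.foldl pvStepA (l, d)
      = (pvSkip (fun x => es.count x) l,
         d.filter (fun p => !(decide (p.1 ∈ es) && decide (p.1 ∈ l)))) := by
  induction es generalizing l d with
  | nil =>
    simp only [List.foldl_nil, List.count_nil]
    rw [pvSkip_zero]
    simp
  | cons e es ih =>
    rw [List.foldl_cons]
    have hcnt : (fun x => (e :: es).count x)
        = (fun y => if y = e then es.count y + 1 else es.count y) := by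
      funext y
      by_cases hy : y = e
      · subst hy; simp
      · simp [List.count_cons, hy]
        exact fun h => hy h.symm
    cases hrem : PySem.List.remove? l e with
    | none =>
      have hel : e ∉ l := (PySem.List.remove?_eq_none_iff l e).mp hrem
      have hstep : pvStepA (l, d) e = (l, d) := by simp [pvStepA, hrem]
      rw [hstep, ih]
      refine Prod.ext ?_ ?_
      · show pvSkip _ l = pvSkip _ l
        rw [hcnt, pvSkip_bump, hrem]
        rfl
      · apply List.filter_congr
        intro p _
        by_cases hpe : p.1 = e
        · simp [hpe, hel]
        · simp [List.mem_cons, hpe]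
    | some l' =>
      have hel : e ∈ l := by
        by_contra h
        rw [(PySem.List.remove?_eq_none_iff l e).mpr h] at hrem
        simp at hrem
      have hl' : l' = l.erase e := by
        rw [PySem.List.remove?_eq_some_erase l e hel] at hrem
        exact (Option.some.inj hrem).symm
      have hstep : pvStepA (l, d) e = (l', pvEraseKey d e) := by simp [pvStepA, hrem]
      rw [hstep, ih]
      refine Prod.ext ?_ ?_
      · show pvSkip _ l' = pvSkip _ l
        rw [hcnt, pvSkip_bump, hrem]
        rfl
      · show List.filter _ (pvEraseKey d e) = List.filter _ d
        rw [pvEraseKey, List.filter_filter]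
        apply List.filter_congr
        intro p _
        by_cases hpe : p.1 = e
        · simp [hpe, hel]
        · have hmem : p.1 ∈ l' ↔ p.1 ∈ l := by
            rw [hl']
            exact List.mem_erase_of_ne hpe
          simp [List.mem_cons, hpe, hmem]

-- B's rebuilding fold appends, after acc, the skip of the list by the dict's budgets
lemma pvFoldB_eq (l : List Int) (nd : PySem.Dict Int Int) (acc : List Int) :
    (l.foldl
      (fun (st : PySem.Dict Int Int × List Int) x =>
        if st.1.getD x 0 > 0 then (st.1.modify x 0 (· - 1), st.2) else (st.1, st.2 ++ [x]))
      (nd, acc)).2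
    = acc ++ pvSkip (fun x => (nd.getD x 0).toNat) l := by
  induction l generalizing nd acc with
  | nil => simp [pvSkip]
  | cons x xs ih =>
    rw [List.foldl_cons]
    by_cases hpos : nd.getD x 0 > 0
    · have hc : ((nd.getD x 0).toNat > 0) := by omega
      simp only [if_pos hpos]
      rw [ih, pvSkip, if_pos hc]
      congr 2
      funext y
      rw [PySem.Dict.getD_modify]
      by_cases hy : y = x
      · subst hy; simp
      · simp [hy]
    · have hc : ¬ ((nd.getD x 0).toNat > 0) := by omega
      simp only [if_neg hpos]
      rw [ih, pvSkip, if_neg hc, List.append_assoc]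
      rfl

-- folding pvEraseKey over a key list = one filter
lemma pvFoldErase_eq (ks : List Int) (d : List (Int × Int)) :
    ks.foldl pvEraseKey d = d.filter (fun p => decide (p.1 ∉ ks)) := by
  induction ks generalizing d with
  | nil => simp
  | cons k ks ih =>
    rw [List.foldl_cons, ih, pvEraseKey, List.filter_filter]
    apply List.filter_congr
    intro p _
    simp [List.mem_cons, not_or, Bool.and_comm]

-- ===== VERDICT (by name: the statement is the Claim_ definition above) =====
theorem getActiveElevators_spec : Claim_equal_getActiveElevators := by
  intro l d es _
  show _ = getActiveElevators_alt l d es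
  simp only [getActiveElevators, getActiveElevators_alt]
  rw [pvFoldA_eq, pvFoldB_eq, pvFoldErase_eq]
  refine Prod.ext ?_ ?_
  · -- dict components
    show List.filter _ d = List.filter _ d
    apply List.filter_congr
    intro p hp
    have hkey : p.1 ∈ d.map (·.1) := List.mem_map.mpr ⟨p, hp, rfl⟩
    by_cases hes : p.1 ∈ es <;> by_cases hl : p.1 ∈ l <;>
      simp [List.mem_filter, hkey, hes, hl, PySem.Set.mem_ofList]
  · -- list components
    show pvSkip _ l = [] ++ pvSkip _ l
    rw [List.nil_append]
    congr 1
    funext x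
    rw [PySem.Dict.getD_foldl_modify_add_one]
    simp
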